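-- pv_equiv track=rewrite | github.com/vedmathai/slang_proj | spacySlangClass.py | __create_annotation
-- ===== SOURCE A (Python) =====
-- def __create_annotation(example):
--     start = 0
--     stop = 0
--     annotations = []
--     for part in example:
--         stop = start + len(part['text'])
--         annotations += [(part['entity'], part['text'], start, stop)]
--         start = stop
--     return annotations
-- ===== SOURCE B (Python) =====
-- def __create_annotation(example):
--     # Two-phase: precompute prefix-sum stop offsets, then assemble tuples by zipping.
--     texts = [part['text'] for part in example]
--     stops = []
--     total = 0
--     for t in texts:
--         total += len(t)
--         stops.append(total)
--     starts = [0] + stops[:-1]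
--     return [(part['entity'], t, a, b)
--             for part, t, a, b in zip(example, texts, starts, stops)]
-- ===== Notes on version B (the rewrite author's own statement) =====
-- stated objective: alternative
-- what changed: Replaces the single running-offset loop that appends tuples one by one with two separate phases: a prefix-sum table of stop offsets (starts derived as 0 plus all but the last stop) and a zip comprehension that assembles the tuples.
import Mathlib
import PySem

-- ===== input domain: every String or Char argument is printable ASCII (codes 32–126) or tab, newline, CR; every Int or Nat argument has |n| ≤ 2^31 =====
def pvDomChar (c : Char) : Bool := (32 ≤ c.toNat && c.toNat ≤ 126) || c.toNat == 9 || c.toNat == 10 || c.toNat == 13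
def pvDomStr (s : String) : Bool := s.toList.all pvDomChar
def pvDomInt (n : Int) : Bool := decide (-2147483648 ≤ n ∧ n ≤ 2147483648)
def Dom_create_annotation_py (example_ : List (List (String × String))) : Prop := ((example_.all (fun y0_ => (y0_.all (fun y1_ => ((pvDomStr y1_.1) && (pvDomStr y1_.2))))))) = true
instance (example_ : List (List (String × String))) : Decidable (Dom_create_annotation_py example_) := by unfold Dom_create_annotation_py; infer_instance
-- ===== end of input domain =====

-- B replaces the single running-offset loop with a prefix-sum table of stop offsets plus a zip
-- comprehension that assembles the tuples (alternative decomposition, same O(n) cost).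

-- ===== PORT A =====
-- A: one loop keeping a running start; appends each tuple as it goes.
-- part['text'] / part['entity'] raise KeyError when absent; Pre_ excludes that, so getD "" is never hit inside Pre_.
def create_annotation_py (example_ : List (List (String × String))) : List (String × String × Int × Int) :=
  (example_.foldl
    (fun (st : Int × List (String × String × Int × Int)) part =>
      let text := ((PySem.Dict.mk part).get? "text").getD ""
      let stop := st.1 + PySem.Str.len text
      (stop, st.2 ++ [(((PySem.Dict.mk part).get? "entity").getD "", text, st.1, stop)]))
    (0, [])).2

-- ===== PORT B =====
-- B phase 1: texts and their prefix-sum stop offsets; phase 2: zip assembly.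
def create_annotation_py_alt (example_ : List (List (String × String))) : List (String × String × Int × Int) :=
  let texts := example_.map (fun part => ((PySem.Dict.mk part).get? "text").getD "")
  let stops := (texts.foldl
      (fun (st : Int × List Int) t =>
        let total := st.1 + PySem.Str.len t
        (total, st.2 ++ [total]))
      (0, [])).2
  let starts := 0 :: stops.dropLast
  ((example_.zip texts).zip (starts.zip stops)).map
    (fun x => (((PySem.Dict.mk x.1.1).get? "entity").getD "", x.1.2, x.2.1, x.2.2))

-- ===== PRECONDITION & SPEC =====
-- Pre_: every part has the keys 'text' and 'entity' (Python A raises KeyError otherwise).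
def Pre_create_annotation_py (example_ : List (List (String × String))) : Prop :=
  example_.all (fun part =>
    ((PySem.Dict.mk part).get? "text").isSome && ((PySem.Dict.mk part).get? "entity").isSome) = true
instance (example_ : List (List (String × String))) : Decidable (Pre_create_annotation_py example_) := by
  unfold Pre_create_annotation_py; infer_instance
def pvWitness_create_annotation_py : (List (List (String × String))) :=
  [[("text", "ab"), ("entity", "X")], [("entity", "Y"), ("text", "c")]]
def Spec_create_annotation_py (example_ : List (List (String × String))) (out : List (String × String × Int × Int)) : Prop := out = create_annotation_py_alt example_
instance (example_ : List (List (String × String))) (out : List (String × String × Int × Int)) : Decidable (Spec_create_annotation_py example_ out) := by unfold Spec_create_annotation_py; infer_instance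

-- ===== CLAIM (what is proved, stated in full; the proofs are below) =====
def Claim_equal_create_annotation_py : Prop := ∀ (example_ : List (List (String × String))), Dom_create_annotation_py example_ → Pre_create_annotation_py example_ → Spec_create_annotation_py example_ (create_annotation_py example_)

-- ===== LEMMAS AND PROOFS =====

-- common reference recursion: tuples with running offset s
def pvSpecRec (s : Int) : List (List (String × String)) → List (String × String × Int × Int)
  | [] => []
  | part :: rest =>
      let t := ((PySem.Dict.mk part).get? "text").getD ""
      (((PySem.Dict.mk part).get? "entity").getD "", t, s, s + PySem.Str.len t)
        :: pvSpecRec (s + PySem.Str.len t) rest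

-- prefix-sum stops from offset c
def pvStops (c : Int) : List String → List Int
  | [] => []
  | t :: r => (c + PySem.Str.len t) :: pvStops (c + PySem.Str.len t) r

lemma pvA_fold (ex : List (List (String × String))) :
    ∀ (s : Int) (acc : List (String × String × Int × Int)),
    (ex.foldl
      (fun (st : Int × List (String × String × Int × Int)) part =>
        let text := ((PySem.Dict.mk part).get? "text").getD ""
        let stop := st.1 + PySem.Str.len text
        (stop, st.2 ++ [(((PySem.Dict.mk part).get? "entity").getD "", text, st.1, stop)]))
      (s, acc)).2 = acc ++ pvSpecRec s ex := by
  induction ex with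
  | nil => intro s acc; simp [pvSpecRec]
  | cons p r ih =>
      intro s acc
      simp only [List.foldl_cons, pvSpecRec, ih]
      simp

lemma pvB_stops (ts : List String) :
    ∀ (c : Int) (acc : List Int),
    (ts.foldl
      (fun (st : Int × List Int) t =>
        let total := st.1 + PySem.Str.len t
        (total, st.2 ++ [total]))
      (c, acc)).2 = acc ++ pvStops c ts := by
  induction ts with
  | nil => intro c acc; simp [pvStops]
  | cons t r ih =>
      intro c acc
      simp only [List.foldl_cons, pvStops, ih]
      simp

lemma pvStops_ne_nil (c : Int) (t : String) (r : List String) :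
    pvStops c (t :: r) ≠ [] := by simp [pvStops]

lemma pvB_assemble (ex : List (List (String × String))) :
    ∀ (s : Int),
    ((ex.zip (ex.map (fun part => ((PySem.Dict.mk part).get? "text").getD ""))).zip
        ((s :: (pvStops s (ex.map (fun part => ((PySem.Dict.mk part).get? "text").getD ""))).dropLast).zip
          (pvStops s (ex.map (fun part => ((PySem.Dict.mk part).get? "text").getD ""))))).map
      (fun x => (((PySem.Dict.mk x.1.1).get? "entity").getD "", x.1.2, x.2.1, x.2.2))
    = pvSpecRec s ex := by
  induction ex with
  | nil => intro s; simp [pvStops, pvSpecRec]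
  | cons p r ih =>
      intro s
      cases r with
      | nil => simp [pvStops, pvSpecRec]
      | cons q r' =>
          simp only [List.map_cons, pvStops, pvSpecRec]
          rw [List.dropLast_cons_of_ne_nil (by exact pvStops_ne_nil _ _ _)]
          simp only [List.zip_cons_cons, List.map_cons]
          refine congrArg _ ?_
          have := ih (s + PySem.Str.len (((PySem.Dict.mk p).get? "text").getD ""))
          simpa [pvStops, pvSpecRec] using this

-- ===== VERDICT (by name: the statement is the Claim_ definition above) =====
theorem create_annotation_py_spec : Claim_equal_create_annotation_py := by
  intro ex _ _
  unfold Spec_create_annotation_py create_annotation_py create_annotation_py_alt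
  simp only [pvA_fold, pvB_stops, List.nil_append]
  exact (pvB_assemble ex 0).symm
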